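-- pv_equiv track=rewrite | github.com/themusharraf/django-Filter | apps/tests.py | chek_time
-- ===== SOURCE A (Python) =====
-- def chek_time(d):
--     jadval = []
--     previous_end_time = '00:00'
--
--     for start_time, end_time in d:
--         jadval.append((previous_end_time, start_time))
--         previous_end_time = end_time
--
--     jadval.append((previous_end_time, '24:00'))
--
--     return jadval
-- ===== SOURCE B (Python) =====
-- def chek_time(d):
--     d = list(d)
--     starts = [s for s, e in d]
--     ends = [e for s, e in d]
--     return list(zip(['00:00'] + ends, starts + ['24:00']))
-- ===== Notes on version B (the rewrite author's own statement) =====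
-- stated objective: idiomatic
-- what changed: Replaces the running-state append loop with a zip of the shifted end-times list against the start-times list, eliminating the mutable accumulator.
import Mathlib
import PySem

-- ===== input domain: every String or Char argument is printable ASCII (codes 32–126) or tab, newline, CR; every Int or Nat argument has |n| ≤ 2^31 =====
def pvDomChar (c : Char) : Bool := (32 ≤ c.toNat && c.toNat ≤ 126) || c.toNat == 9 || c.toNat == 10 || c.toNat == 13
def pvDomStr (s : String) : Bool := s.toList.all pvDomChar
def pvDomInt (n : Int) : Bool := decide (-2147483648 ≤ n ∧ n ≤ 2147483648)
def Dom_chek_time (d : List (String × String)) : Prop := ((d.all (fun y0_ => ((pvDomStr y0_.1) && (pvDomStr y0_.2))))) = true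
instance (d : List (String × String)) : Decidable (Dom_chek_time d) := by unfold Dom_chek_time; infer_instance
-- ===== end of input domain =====

-- B replaces A's running-state append loop with a zip of shifted start/end lists (idiomatic, same cost).

-- ===== PORT A =====
-- the loop with state (jadval, previous_end_time); structural recursion over d carrying previous_end_time,
-- with the final append at the base case
def chek_time_go (prev : String) (d : List (String × String)) : List (String × String) :=
  match d with
  | [] => [(prev, "24:00")]
  | (s, e) :: t => (prev, s) :: chek_time_go e t

def chek_time (d : List (String × String)) : List (String × String) :=
  chek_time_go "00:00" d

-- ===== PORT B =====
def chek_time_alt (d : List (String × String)) : List (String × String) :=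
  List.zip ("00:00" :: d.map (·.2)) (d.map (·.1) ++ ["24:00"])

-- ===== PRECONDITION & SPEC =====
def Spec_chek_time (d : List (String × String)) (out : List (String × String)) : Prop := out = chek_time_alt d
instance (d : List (String × String)) (out : List (String × String)) : Decidable (Spec_chek_time d out) := by unfold Spec_chek_time; infer_instance

-- ===== CLAIM (what is proved, stated in full; the proofs are below) =====
def Claim_equal_chek_time : Prop := ∀ (d : List (String × String)), Dom_chek_time d → Spec_chek_time d (chek_time d)

-- ===== LEMMAS AND PROOFS =====
theorem chek_time_go_eq_zip (d : List (String × String)) (prev : String) :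
    chek_time_go prev d = List.zip (prev :: d.map (·.2)) (d.map (·.1) ++ ["24:00"]) := by
  induction d generalizing prev with
  | nil => rfl
  | cons h t ih => cases h with | mk s e => simp [chek_time_go, ih e, List.zip]

-- ===== VERDICT (by name: the statement is the Claim_ definition above) =====
theorem chek_time_spec : Claim_equal_chek_time := by
  intro d _
  unfold Spec_chek_time chek_time chek_time_alt
  exact chek_time_go_eq_zip d "00:00"
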